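-- pv_equiv track=rewrite | github.com/cyrillOCR/Feature-Extraction | modules/mean_vertical_horizontal_on.py | sum_vertical_distance
-- ===== SOURCE A (Python) =====
-- def sum_vertical_distance(image):
--     sum=0
--     height=len(image)
--     width=len(image[0])
--     for i in range(0,width): #coloane
--         for j in range(0,height): #linii
--              if(image[j][i]>200):
--                 for k in range(j+1,height):
--                     if image[k][i]>200:
--                         sum=sum+k-j
--                         break
--     return sum
-- ===== SOURCE B (Python) =====
-- def sum_vertical_distance(image):
--     # Per column, the sum of gaps between consecutive on-pixels telescopes
--     # to (last on-row - first on-row): one scan per column instead of a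
--     # nested forward search per on-pixel (fewer scans; measured speed varies).
--     total = 0
--     for i in range(len(image[0])):
--         ons = [j for j, row in enumerate(image) if row[i] > 200]
--         if ons:
--             total += ons[-1] - ons[0]
--     return total
-- ===== Notes on version B (the rewrite author's own statement) =====
-- stated objective: alternative
-- what changed: Instead of searching forward from every on-pixel for the next on-pixel in its column (a nested scan, O(W*H^2) worst case), B collects the on-row indices of each column in one pass and uses the telescoping identity sum of consecutive gaps = last - first; measured speed-up varies with pixel density (2.0x median at the largest size, not consistent).
import Mathlib
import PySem

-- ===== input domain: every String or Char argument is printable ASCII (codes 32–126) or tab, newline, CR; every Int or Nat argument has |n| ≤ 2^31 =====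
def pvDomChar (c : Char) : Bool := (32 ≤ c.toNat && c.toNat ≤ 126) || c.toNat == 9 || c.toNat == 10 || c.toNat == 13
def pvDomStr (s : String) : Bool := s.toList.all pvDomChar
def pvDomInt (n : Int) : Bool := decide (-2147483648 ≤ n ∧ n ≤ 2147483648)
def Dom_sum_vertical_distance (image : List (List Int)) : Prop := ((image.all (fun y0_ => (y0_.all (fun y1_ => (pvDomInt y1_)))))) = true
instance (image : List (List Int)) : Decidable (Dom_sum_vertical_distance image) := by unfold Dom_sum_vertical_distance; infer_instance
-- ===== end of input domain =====

-- B replaces A's nested forward search per on-pixel by one scan per column and the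
-- telescoping identity (sum of consecutive gaps = last on-row - first on-row).
-- ===== PORT A =====
-- inner 'for k in range(j+1, height): if image[k][i] > 200: sum += k - j; break'
-- (returns the contribution added to sum: k - j for the first such k, else 0)
def svdFindNext (image : List (List Int)) (i j : Int) : List Int → Int
  | [] => 0
  | k :: rest =>
    if PySem.List.pyGetD (PySem.List.pyGetD image k []) i 0 > 200 then k - j
    else svdFindNext image i j rest

-- middle loop 'for j in range(0, height)' with accumulator sum
def svdRows (image : List (List Int)) (i height : Int) (s : Int) : List Int → Int
  | [] => s
  | j :: rest =>
    if PySem.List.pyGetD (PySem.List.pyGetD image j []) i 0 > 200 then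
      svdRows image i height
        (s + svdFindNext image i j (PySem.List.pyRange (j + 1) height 1)) rest
    else svdRows image i height s rest

def sum_vertical_distance (image : List (List Int)) : Int :=
  let height : Int := image.length
  let width : Int := (PySem.List.pyGetD image 0 []).length
  (PySem.List.pyRange 0 width 1).foldl
    (fun s i => svdRows image i height s (PySem.List.pyRange 0 height 1)) 0

-- ===== PORT B =====
def sum_vertical_distance_alt (image : List (List Int)) : Int :=
  let width : Int := (PySem.List.pyGetD image 0 []).length
  (PySem.List.pyRange 0 width 1).foldl
    (fun total i =>
      let ons : List Int := (PySem.List.enumerate image 0).filterMap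
        (fun p => if PySem.List.pyGetD p.2 i 0 > 200 then some p.1 else none)
      if ons.isEmpty then total
      else total + (PySem.List.pyGetD ons (-1) 0 - PySem.List.pyGetD ons 0 0)) 0

-- ===== PRECONDITION & SPEC =====
-- Pre_ excludes exactly the inputs where Python A raises an IndexError: the empty image
-- (image[0]) and ragged images whose later rows are shorter than row 0 (image[k][i]).
def Pre_sum_vertical_distance (image : List (List Int)) : Prop :=
  image ≠ [] ∧ ∀ row ∈ image, (image.getD 0 []).length ≤ row.length
instance (image : List (List Int)) : Decidable (Pre_sum_vertical_distance image) := by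
  unfold Pre_sum_vertical_distance; infer_instance
def pvWitness_sum_vertical_distance : List (List Int) := [[0, 250], [201, 0], [0, 250]]
def Spec_sum_vertical_distance (image : List (List Int)) (out : Int) : Prop := out = sum_vertical_distance_alt image
instance (image : List (List Int)) (out : Int) : Decidable (Spec_sum_vertical_distance image out) := by unfold Spec_sum_vertical_distance; infer_instance

-- ===== CLAIM (what is proved, stated in full; the proofs are below) =====
def Claim_equal_sum_vertical_distance : Prop := ∀ (image : List (List Int)), Dom_sum_vertical_distance image → Pre_sum_vertical_distance image → Spec_sum_vertical_distance image (sum_vertical_distance image)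

-- ===== LEMMAS AND PROOFS =====

-- sum of consecutive gaps in a list of indices
def svdGaps : List Int → Int
  | [] => 0
  | [_] => 0
  | a :: b :: t => (b - a) + svdGaps (b :: t)

theorem svdFindNext_eq_filter_head (image : List (List Int)) (i j : Int) (ks : List Int) :
    svdFindNext image i j ks =
      (match ks.filter (fun k => decide (PySem.List.pyGetD (PySem.List.pyGetD image k []) i 0 > 200)) with
        | [] => 0
        | k :: _ => k - j) := by
  induction ks with
  | nil => simp [svdFindNext]
  | cons k rest ih =>
    by_cases h : PySem.List.pyGetD (PySem.List.pyGetD image k []) i 0 > 200 <;>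
      simp [svdFindNext, h, ih]

theorem svdRows_eq_gaps (image : List (List Int)) (i : Int) (h : Int) :
    ∀ (n : Nat) (j0 s : Int), (h - j0).toNat ≤ n →
      svdRows image i h s (PySem.List.pyRange j0 h 1) =
        s + svdGaps ((PySem.List.pyRange j0 h 1).filter
          (fun k => decide (PySem.List.pyGetD (PySem.List.pyGetD image k []) i 0 > 200))) := by
  intro n
  induction n with
  | zero =>
    intro j0 s hn
    rw [PySem.List.pyRange_one_eq_nil (by omega)]
    simp [svdRows, svdGaps]
  | succ n ih =>
    intro j0 s hn
    by_cases hj : j0 < h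
    · rw [PySem.List.pyRange_one_cons hj]
      by_cases hq : PySem.List.pyGetD (PySem.List.pyGetD image j0 []) i 0 > 200
      · simp only [svdRows, hq, if_pos]
        rw [ih (j0 + 1) _ (by omega)]
        rw [List.filter_cons]
        simp only [hq, decide_true, if_pos]
        rw [svdFindNext_eq_filter_head]
        cases hf : (PySem.List.pyRange (j0 + 1) h 1).filter
            (fun k => decide (PySem.List.pyGetD (PySem.List.pyGetD image k []) i 0 > 200)) with
        | nil => simp [svdGaps]
        | cons b t => simp only [svdGaps]; ring
      · simp only [svdRows, hq, if_neg, not_false_iff]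
        rw [ih (j0 + 1) _ (by omega)]
        rw [List.filter_cons]
        simp [hq]
    · rw [PySem.List.pyRange_one_eq_nil (by omega)]
      simp [svdRows, svdGaps]

theorem svdGaps_telescope (a : Int) (t : List Int) :
    svdGaps (a :: t) = (a :: t).getLast (by simp) - a := by
  induction t generalizing a with
  | nil => simp [svdGaps]
  | cons b t ih =>
    rw [svdGaps, ih b]
    have hl : (a :: b :: t).getLast (by simp) = (b :: t).getLast (by simp) := by
      rw [List.getLast_cons]
    rw [hl]; ring

-- B's on-index comprehension = A's range filtered, shifted by the start index
theorem svdEnum_filter (i : Int) :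
    ∀ (xs : List (List Int)) (s : Int),
      (PySem.List.enumerate xs s).filterMap
          (fun p => if PySem.List.pyGetD p.2 i 0 > 200 then some p.1 else none)
        = (PySem.List.pyRange s (s + xs.length) 1).filter
            (fun k => decide (PySem.List.pyGetD (PySem.List.pyGetD xs (k - s) []) i 0 > 200)) := by
  intro xs
  induction xs with
  | nil =>
    intro s
    simp [PySem.List.enumerate_nil]
  | cons x xs ih =>
    intro s
    rw [PySem.List.enumerate_cons]
    rw [PySem.List.pyRange_one_cons (by simp)]
    rw [List.filterMap_cons, List.filter_cons]
    simp only [sub_self, PySem.List.pyGetD_zero_cons]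
    have hrest : (PySem.List.pyRange (s + 1) (s + (↑(x :: xs).length)) 1).filter
        (fun k => decide (PySem.List.pyGetD (PySem.List.pyGetD (x :: xs) (k - s) []) i 0 > 200))
      = (PySem.List.pyRange (s + 1) ((s + 1) + (↑xs.length)) 1).filter
        (fun k => decide (PySem.List.pyGetD (PySem.List.pyGetD xs (k - (s + 1)) []) i 0 > 200)) := by
      have harg : (s + (((x :: xs).length : Nat) : Int)) = (s + 1) + (xs.length : Int) := by
        simp; ring
      rw [harg]
      apply List.filter_congr
      intro k hk
      rw [PySem.List.mem_pyRange_one] at hk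
      have h1 : PySem.List.pyGetD (x :: xs) (k - s) [] = PySem.List.pyGetD xs (k - (s + 1)) [] := by
        have h0 : (0:Int) ≤ k - (s+1) := by omega
        rw [PySem.List.pyGetD_of_nonneg _ _ (by omega : (0:Int) ≤ k - s), PySem.List.pyGetD_of_nonneg _ _ h0]
        have : (k - s).toNat = (k - (s+1)).toNat + 1 := by omega
        simp [this]
      rw [h1]
    by_cases hx : PySem.List.pyGetD x i 0 > 200
    · simp only [hx, if_pos, decide_true]
      rw [ih (s + 1), hrest]
    · simp only [hx, if_neg, not_false_iff, decide_false]
      rw [ih (s + 1), hrest]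
      simp

-- per-column bodies of the two outer folds agree
theorem svd_col_eq (image : List (List Int)) (i s : Int) :
    svdRows image i (image.length : Int) s (PySem.List.pyRange 0 (image.length : Int) 1)
      = (let ons : List Int := (PySem.List.enumerate image 0).filterMap
            (fun p => if PySem.List.pyGetD p.2 i 0 > 200 then some p.1 else none)
         if ons.isEmpty then s
         else s + (PySem.List.pyGetD ons (-1) 0 - PySem.List.pyGetD ons 0 0)) := by
  rw [svdRows_eq_gaps image i _ ((image.length : Int) - 0).toNat 0 s le_rfl]
  have he := svdEnum_filter i image 0
  simp only [zero_add, sub_zero] at he ⊢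
  rw [he]
  cases hf : (PySem.List.pyRange 0 (image.length : Int) 1).filter
      (fun k => decide (PySem.List.pyGetD (PySem.List.pyGetD image k []) i 0 > 200)) with
  | nil => simp [svdGaps]
  | cons a t =>
    simp only [List.isEmpty_cons, if_neg Bool.false_ne_true]
    rw [svdGaps_telescope]
    rw [PySem.List.pyGetD_neg_one (a :: t) 0 (by simp), PySem.List.pyGetD_zero_cons]

theorem svd_foldl_eq (image : List (List Int)) (is : List Int) (s : Int) :
    is.foldl (fun s i => svdRows image i (image.length : Int) s
        (PySem.List.pyRange 0 (image.length : Int) 1)) s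
      = is.foldl (fun total i =>
          let ons : List Int := (PySem.List.enumerate image 0).filterMap
            (fun p => if PySem.List.pyGetD p.2 i 0 > 200 then some p.1 else none)
          if ons.isEmpty then total
          else total + (PySem.List.pyGetD ons (-1) 0 - PySem.List.pyGetD ons 0 0)) s := by
  induction is generalizing s with
  | nil => rfl
  | cons i is ih => simp only [List.foldl_cons]; rw [svd_col_eq, ih]

-- ===== VERDICT (by name: the statement is the Claim_ definition above) =====
theorem sum_vertical_distance_spec : Claim_equal_sum_vertical_distance := by
  intro image _ _
  unfold Spec_sum_vertical_distance sum_vertical_distance sum_vertical_distance_alt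
  exact svd_foldl_eq image _ 0
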